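-- pv_equiv track=rewrite | github.com/linaber1/coconut | ARM/train_treesearch_2layers.py | find_path_dfs
-- ===== SOURCE A (Python) =====
-- def find_path_dfs(edges, root, target):
--     # Build adjacency list
--     adj = {}
--     for u, v in edges:
--         adj.setdefault(u, []).append(v)
--         adj.setdefault(v, []).append(u)   # undirected
--
--     visited = set()
--     path = []
--
--     def dfs(node):
--         visited.add(node)
--         path.append(node)
--
--         if node == target:
--             return True  # found the goal
--
--         # DFS on neighbors
--         for nxt in adj.get(node, []):
--             if nxt not in visited:
--                 if dfs(nxt):
--                     return True
--
--         # Backtrack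
--         path.append(node)   # record backtrack step (e.g., 2 → 3 → 2)
--         return False
--
--     dfs(root)
--     return path
-- ===== SOURCE B (Python) =====
-- def find_path_dfs(edges, root, target):
--     # Build adjacency list (same as A)
--     adj = {}
--     for u, v in edges:
--         adj.setdefault(u, []).append(v)
--         adj.setdefault(v, []).append(u)
--
--     visited = {root}
--     path = [root]
--     if root == target:
--         return path
--
--     # Explicit stack of frames: (node, remaining neighbours to try)
--     stack = [(root, adj.get(root, []))]
--     while stack:
--         node, ns = stack[-1]
--         if ns:
--             n = ns[0]
--             stack[-1] = (node, ns[1:])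
--             if n in visited:
--                 continue
--             visited.add(n)
--             path.append(n)
--             if n == target:
--                 return path  # found: stop, no backtrack records on the chain
--             stack.append((n, adj.get(n, [])))
--         else:
--             stack.pop()
--             path.append(node)  # backtrack record
--     return path
-- ===== Notes on version B (the rewrite author's own statement) =====
-- stated objective: alternative
-- what changed: Replaced the recursive dfs (with nested neighbour loop and backtracking appends on return) by an iterative explicit stack of (node, remaining-neighbours) frames that records the same entry/backtrack path and aborts on reaching the target.
import Mathlib
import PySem

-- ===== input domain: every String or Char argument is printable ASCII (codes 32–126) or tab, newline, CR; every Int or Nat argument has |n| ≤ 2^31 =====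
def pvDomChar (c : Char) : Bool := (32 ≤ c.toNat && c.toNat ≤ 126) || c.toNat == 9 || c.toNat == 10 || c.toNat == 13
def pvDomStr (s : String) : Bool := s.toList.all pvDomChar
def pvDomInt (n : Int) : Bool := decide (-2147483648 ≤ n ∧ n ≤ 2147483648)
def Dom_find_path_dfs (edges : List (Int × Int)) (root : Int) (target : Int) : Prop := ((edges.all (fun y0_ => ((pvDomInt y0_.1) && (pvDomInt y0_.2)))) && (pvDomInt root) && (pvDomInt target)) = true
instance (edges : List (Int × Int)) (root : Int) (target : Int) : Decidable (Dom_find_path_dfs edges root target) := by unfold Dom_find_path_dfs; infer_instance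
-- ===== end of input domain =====

-- B replaces A's recursive dfs by an iterative explicit stack of (node, remaining-neighbours) frames
-- (same adjacency list, same visitation order, same backtrack records); objective: alternative decomposition.

-- ===== PORT A =====
-- adjacency list: adj.setdefault(u, []).append(v) = modify u [] (· ++ [v]) (shared by both ports)
def pvBuildAdj (edges : List (Int × Int)) : PySem.Dict Int (List Int) :=
  edges.foldl (fun adj e =>
    (adj.modify e.1 [] (· ++ [e.2])).modify e.2 [] (· ++ [e.1])) PySem.Dict.empty

-- the 'for nxt in adj.get(node, [])' loop of dfs, parameterised by the recursive call
def pvLoopAWith (dfs : Int → PySem.Set Int → List Int → Bool × PySem.Set Int × List Int) :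
    List Int → PySem.Set Int → List Int → Bool × PySem.Set Int × List Int
  | [], v, p => (false, v, p)
  | n :: ns, v, p =>
    if PySem.Set.contains v n then pvLoopAWith dfs ns v p
    else
      match dfs n v p with
      | (true, v', p') => (true, v', p')
      | (false, v', p') => pvLoopAWith dfs ns v' p'

-- Python's recursive dfs, with a recursion-depth fuel as totality guard only: each call is on a
-- node not yet visited, so the depth never exceeds the number of distinct nodes ≤ 2*|edges|+1,
-- the fuel find_path_dfs supplies; the fuel-0 branch is unreachable there.
def pvDfsA (adj : PySem.Dict Int (List Int)) (target : Int) :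
    Nat → Int → PySem.Set Int → List Int → Bool × PySem.Set Int × List Int
  | 0, _, v, p => (false, v, p)
  | f + 1, node, v, p =>
    let v1 := PySem.Set.add v node
    let p1 := p ++ [node]
    if node = target then (true, v1, p1)
    else
      match pvLoopAWith (pvDfsA adj target f) (adj.getD node []) v1 p1 with
      | (true, v', p') => (true, v', p')
      | (false, v', p') => (false, v', p' ++ [node])   -- backtrack record

def find_path_dfs (edges : List (Int × Int)) (root : Int) (target : Int) : List Int :=
  let adj := pvBuildAdj edges
  (pvDfsA adj target (2 * edges.length + 1) root PySem.Set.empty []).2.2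

-- ===== PORT B =====
-- bound on the length of any adjacency list (data only, used to size the step budget below)
def pvMaxLen (adj : PySem.Dict Int (List Int)) : Nat :=
  (adj.values.map List.length).foldl max 0

-- upper bound on the number of steps the stack machine can still take from a stack
def pvCostK (K : Nat) (st : List (Int × List Int × Nat)) : Nat :=
  (st.map (fun fr => (fr.2.1.length + 1) * K ^ fr.2.2)).sum

-- Source B's while loop over an explicit stack; each frame is (node, remaining neighbours, frame fuel).
-- The first Nat is a global step budget and the per-frame fuel mirrors A's depth fuel: both are
-- totality guards only — with the budgets find_path_dfs_alt supplies, their 0-branches are unreachable.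
def pvRunB (adj : PySem.Dict Int (List Int)) (target : Int) :
    Nat → List (Int × List Int × Nat) → PySem.Set Int → List Int → List Int
  | 0, _, _, p => p
  | _ + 1, [], _, p => p
  | k + 1, (node, [], _) :: rest, v, p => pvRunB adj target k rest v (p ++ [node])  -- exhausted: pop, backtrack record
  | k + 1, (node, n :: ns, f) :: rest, v, p =>
    if PySem.Set.contains v n then pvRunB adj target k ((node, ns, f) :: rest) v p
    else
      match f with
      | 0 => pvRunB adj target k ((node, ns, 0) :: rest) v p
      | g + 1 =>
        let v1 := PySem.Set.add v n
        let p1 := p ++ [n]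
        if n = target then p1   -- found: stop, no backtrack records on the chain
        else pvRunB adj target k ((n, adj.getD n [], g) :: (node, ns, g + 1) :: rest) v1 p1

def find_path_dfs_alt (edges : List (Int × Int)) (root : Int) (target : Int) : List Int :=
  let adj := pvBuildAdj edges
  let visited := PySem.Set.add PySem.Set.empty root
  let path := ([root] : List Int)
  if root = target then path
  else
    let stack := [(root, adj.getD root [], 2 * edges.length)]
    pvRunB adj target (pvCostK (pvMaxLen adj + 2) stack) stack visited path

-- ===== PRECONDITION & SPEC =====
def Spec_find_path_dfs (edges : List (Int × Int)) (root : Int) (target : Int) (out : List Int) : Prop := out = find_path_dfs_alt edges root target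
instance (edges : List (Int × Int)) (root : Int) (target : Int) (out : List Int) : Decidable (Spec_find_path_dfs edges root target out) := by unfold Spec_find_path_dfs; infer_instance

-- ===== CLAIM (what is proved, stated in full; the proofs are below) =====
def Claim_equal_find_path_dfs : Prop := ∀ (edges : List (Int × Int)) (root : Int) (target : Int), Dom_find_path_dfs edges root target → Spec_find_path_dfs edges root target (find_path_dfs edges root target)

-- ===== LEMMAS AND PROOFS =====

lemma pvAdjLe (adj : PySem.Dict Int (List Int)) :
    ∀ n : Int, (adj.getD n []).length ≤ pvMaxLen adj := by
  intro n
  rcases h : adj.get? n with _ | w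
  · simp [PySem.Dict.getD_eq_get?_getD, h]
  · have hw : w ∈ adj.values := by
      have hm := PySem.Dict.mem_items_of_get?_eq_some adj h
      simp only [PySem.Dict.values]
      exact List.mem_map.mpr ⟨(n, w), hm, rfl⟩
    have := (PySem.List.le_foldl_max (adj.values.map List.length) 0).2 w.length
      (List.mem_map.mpr ⟨w, hw, rfl⟩)
    simpa [PySem.Dict.getD_eq_get?_getD, h, pvMaxLen] using this

-- cost facts: every machine transition lowers pvCostK by at least one
lemma pvPowPos (K g : Nat) (hK : 2 ≤ K) : 0 < K ^ g := pow_pos (by omega) g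

lemma pvCost_cons_pos (K : Nat) (hK : 2 ≤ K) (fr : Int × List Int × Nat)
    (rest : List (Int × List Int × Nat)) : 1 ≤ pvCostK K (fr :: rest) := by
  have h1 : 0 < (fr.2.1.length + 1) * K ^ fr.2.2 :=
    Nat.mul_pos (by omega) (pvPowPos K fr.2.2 hK)
  simp only [pvCostK, List.map_cons, List.sum_cons]
  omega

lemma pvCost_pop (K : Nat) (hK : 2 ≤ K) (node : Int) (f : Nat)
    (rest : List (Int × List Int × Nat)) :
    pvCostK K rest + 1 ≤ pvCostK K ((node, [], f) :: rest) := by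
  have := pvPowPos K f hK
  simp only [pvCostK, List.map_cons, List.sum_cons, List.length_nil]
  omega

lemma pvCost_skip (K : Nat) (hK : 2 ≤ K) (node n : Int) (ns : List Int) (f : Nat)
    (rest : List (Int × List Int × Nat)) :
    pvCostK K ((node, ns, f) :: rest) + 1 ≤ pvCostK K ((node, n :: ns, f) :: rest) := by
  have := pvPowPos K f hK
  simp only [pvCostK, List.map_cons, List.sum_cons, List.length_cons]
  have : (ns.length + 1) * K ^ f + K ^ f = (ns.length + 1 + 1) * K ^ f := by ring
  omega

lemma pvCost_push (adj : PySem.Dict Int (List Int)) (node n : Int) (ns : List Int) (g : Nat)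
    (rest : List (Int × List Int × Nat)) :
    pvCostK (pvMaxLen adj + 2) ((n, adj.getD n [], g) :: (node, ns, g + 1) :: rest) + 1
      ≤ pvCostK (pvMaxLen adj + 2) ((node, n :: ns, g + 1) :: rest) := by
  have hp : 0 < (pvMaxLen adj + 2) ^ g := pvPowPos _ g (by omega)
  have hb : (adj.getD n []).length + 1 < pvMaxLen adj + 2 := by
    have := pvAdjLe adj n; omega
  have hstep : ((adj.getD n []).length + 1) * (pvMaxLen adj + 2) ^ g + 1
      ≤ (pvMaxLen adj + 2) ^ (g + 1) := by
    have h2 : ((adj.getD n []).length + 1) * (pvMaxLen adj + 2) ^ g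
        < (pvMaxLen adj + 2) * (pvMaxLen adj + 2) ^ g :=
      mul_lt_mul_of_pos_right hb hp
    have h3 : (pvMaxLen adj + 2) * (pvMaxLen adj + 2) ^ g = (pvMaxLen adj + 2) ^ (g + 1) := by
      rw [pow_succ]; ring
    omega
  simp only [pvCostK, List.map_cons, List.sum_cons, List.length_cons]
  have hx : (ns.length + 1 + 1) * (pvMaxLen adj + 2) ^ (g + 1)
      = (ns.length + 1) * (pvMaxLen adj + 2) ^ (g + 1) + (pvMaxLen adj + 2) ^ (g + 1) := by ring
  omega

-- the machine's value is stable once the budget reaches pvCostK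
lemma pvStable (adj : PySem.Dict Int (List Int)) (target : Int) :
    ∀ (c : Nat) (st : List (Int × List Int × Nat)) (k : Nat) (v : PySem.Set Int) (p : List Int),
      pvCostK (pvMaxLen adj + 2) st ≤ c → pvCostK (pvMaxLen adj + 2) st ≤ k →
      pvRunB adj target (k + 1) st v p = pvRunB adj target k st v p := by
  intro c
  induction c using Nat.strong_induction_on with
  | _ c ihc =>
    intro st k v p hc hk
    rcases st with _ | ⟨⟨node, ns, f⟩, rest⟩
    · rcases k with _ | k <;> simp [pvRunB]
    · have h1 : 1 ≤ pvCostK (pvMaxLen adj + 2) ((node, ns, f) :: rest) :=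
        pvCost_cons_pos _ (by omega) _ _
      rcases k with _ | k
      · omega
      rcases ns with _ | ⟨n, ns⟩
      · -- pop
        have hd := pvCost_pop (pvMaxLen adj + 2) (by omega) node f rest
        simp only [pvRunB]
        exact ihc (c - 1) (by omega) rest (k := k) _ _ (by omega) (by omega)
      · by_cases hcn : PySem.Set.contains v n = true
        · have hd := pvCost_skip (pvMaxLen adj + 2) (by omega) node n ns f rest
          simp only [pvRunB, hcn, if_true]
          exact ihc (c - 1) (by omega) _ (k := k) _ _ (by omega) (by omega)
        · rw [Bool.not_eq_true] at hcn
          rcases f with _ | g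
          · have hd := pvCost_skip (pvMaxLen adj + 2) (by omega) node n ns 0 rest
            simp only [pvRunB, hcn, Bool.false_eq_true, if_false]
            exact ihc (c - 1) (by omega) _ (k := k) _ _ (by omega) (by omega)
          · have hd := pvCost_push adj node n ns g rest
            have hd2 := pvCost_skip (pvMaxLen adj + 2) (by omega) node n ns (g + 1) rest
            simp only [pvRunB, hcn, Bool.false_eq_true, if_false]
            by_cases ht : n = target
            · simp [ht]
            · simp only [ht, if_false]
              exact ihc (c - 1) (by omega) _ (k := k) _ _ (by omega) (by omega)

lemma pvRaise (adj : PySem.Dict Int (List Int)) (target : Int) :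
    ∀ (d k : Nat) (st : List (Int × List Int × Nat)) (v : PySem.Set Int) (p : List Int),
      pvCostK (pvMaxLen adj + 2) st ≤ k →
      pvRunB adj target (k + d) st v p = pvRunB adj target k st v p := by
  intro d
  induction d with
  | zero => intro k st v p _; rfl
  | succ d ihd =>
    intro k st v p hk
    have h1 : k + (d + 1) = (k + d) + 1 := by omega
    rw [h1, pvStable adj target (pvCostK (pvMaxLen adj + 2) st) st (k + d) v p (le_refl _) (by omega),
        ihd k st v p hk]

lemma pvLower (adj : PySem.Dict Int (List Int)) (target : Int)
    (k k' : Nat) (st : List (Int × List Int × Nat)) (v : PySem.Set Int) (p : List Int)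
    (hk : pvCostK (pvMaxLen adj + 2) st ≤ k) (hkk : k ≤ k') :
    pvRunB adj target k' st v p = pvRunB adj target k st v p := by
  have h1 : k' = k + (k' - k) := by omega
  rw [h1, pvRaise adj target (k' - k) k st v p hk]

-- Simulation: with enough budget, a stack whose top frame is (node, ns, f) behaves exactly like
-- A's neighbour loop over ns at fuel f, followed by the pop of node (A's backtrack append)
-- unless the target was hit.
lemma pvSim (adj : PySem.Dict Int (List Int)) (target : Int) :
    ∀ (f : Nat) (ns : List Int) (node : Int) (rest : List (Int × List Int × Nat))
      (v : PySem.Set Int) (p : List Int) (k : Nat),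
      pvCostK (pvMaxLen adj + 2) ((node, ns, f) :: rest) ≤ k →
      pvRunB adj target k ((node, ns, f) :: rest) v p =
        (match pvLoopAWith (pvDfsA adj target f) ns v p with
         | (true, _, p') => p'
         | (false, v', p') =>
             pvRunB adj target (pvCostK (pvMaxLen adj + 2) rest) rest v' (p' ++ [node])) := by
  intro f
  induction f using Nat.strong_induction_on with
  | _ f ihf =>
    intro ns node
    induction ns with
    | nil =>
      intro rest v p k hk
      have h1 := pvCost_cons_pos (pvMaxLen adj + 2) (by omega) (node, ([] : List Int), f) rest
      rcases k with _ | k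
      · omega
      have hd := pvCost_pop (pvMaxLen adj + 2) (by omega) node f rest
      simp only [pvRunB, pvLoopAWith]
      exact pvLower adj target (pvCostK (pvMaxLen adj + 2) rest) k rest v (p ++ [node])
        (le_refl _) (by omega)
    | cons n ns ihns =>
      intro rest v p k hk
      have h1 := pvCost_cons_pos (pvMaxLen adj + 2) (by omega) (node, n :: ns, f) rest
      rcases k with _ | k
      · omega
      by_cases hcn : PySem.Set.contains v n = true
      · have hd := pvCost_skip (pvMaxLen adj + 2) (by omega) node n ns f rest
        simp only [pvRunB, pvLoopAWith, hcn, if_true]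
        exact ihns rest v p k (by omega)
      · rw [Bool.not_eq_true] at hcn
        rcases f with _ | g
        · have hd := pvCost_skip (pvMaxLen adj + 2) (by omega) node n ns 0 rest
          simp only [pvRunB, pvLoopAWith, pvDfsA, hcn, Bool.false_eq_true, if_false]
          exact ihns rest v p k (by omega)
        · have hd := pvCost_push adj node n ns g rest
          have hd2 := pvCost_skip (pvMaxLen adj + 2) (by omega) node n ns (g + 1) rest
          simp only [pvRunB, pvLoopAWith, pvDfsA, hcn, Bool.false_eq_true, if_false]
          by_cases ht : n = target
          · simp [ht]
          · simp only [ht, if_false]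
            rw [ihf g (Nat.lt_succ_self g) (adj.getD n []) n
                ((node, ns, g + 1) :: rest) (PySem.Set.add v n) (p ++ [n]) k (by omega)]
            rcases hl : pvLoopAWith (pvDfsA adj target g) (adj.getD n [])
                (PySem.Set.add v n) (p ++ [n]) with ⟨b, v', p'⟩
            rcases b with _ | _
            · simpa using ihns rest v' (p' ++ [n])
                (pvCostK (pvMaxLen adj + 2) ((node, ns, g + 1) :: rest)) (le_refl _)
            · simp

-- ===== VERDICT (by name: the statement is the Claim_ definition above) =====
theorem find_path_dfs_spec : Claim_equal_find_path_dfs := by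
  intro edges root target _
  unfold Spec_find_path_dfs find_path_dfs find_path_dfs_alt
  simp only
  rw [pvDfsA]
  by_cases ht : root = target
  · simp [ht]
  · simp only [ht, if_false, List.nil_append]
    rw [pvSim (pvBuildAdj edges) target (2 * edges.length) ((pvBuildAdj edges).getD root [])
        root [] (PySem.Set.add PySem.Set.empty root) [root] _ (le_refl _)]
    rcases hl : pvLoopAWith (pvDfsA (pvBuildAdj edges) target (2 * edges.length))
        ((pvBuildAdj edges).getD root []) (PySem.Set.add PySem.Set.empty root) [root]
      with ⟨b, v', p'⟩
    rcases b with _ | _ <;> simp [pvRunB, pvCostK]
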